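-- pv_equiv track=rewrite | github.com/microsoft/CompHRDoc | evaluation/hrdoc_tool/doc_utils.py | split_list_by_tag
-- ===== SOURCE A (Python) =====
-- def split_list_by_tag(input_list, tag="<p>"):
--     output_list = []
--     temp_list = []
--
--     for item in input_list:
--         if item == tag:
--             if temp_list:
--                 output_list.append(temp_list)
--                 temp_list = []
--         else:
--             temp_list.append(item)
--
--     if temp_list:
--         output_list.append(temp_list)
--
--     return output_list
-- ===== SOURCE B (Python) =====
-- def split_list_by_tag(input_list, tag="<p>"):
--     res = []
--     start = None
--     for i, item in enumerate(input_list):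
--         if item == tag:
--             if start is not None:
--                 res.append(input_list[start:i])
--                 start = None
--         elif start is None:
--             start = i
--     if start is not None:
--         res.append(input_list[start:])
--     return res
-- ===== Notes on version B (the rewrite author's own statement) =====
-- stated objective: alternative
-- what changed: Instead of accumulating elements one by one into a temp list that is flushed at each tag, B tracks only the start index of the current non-tag run and appends a slice input_list[start:i] when the run ends.
import Mathlib
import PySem

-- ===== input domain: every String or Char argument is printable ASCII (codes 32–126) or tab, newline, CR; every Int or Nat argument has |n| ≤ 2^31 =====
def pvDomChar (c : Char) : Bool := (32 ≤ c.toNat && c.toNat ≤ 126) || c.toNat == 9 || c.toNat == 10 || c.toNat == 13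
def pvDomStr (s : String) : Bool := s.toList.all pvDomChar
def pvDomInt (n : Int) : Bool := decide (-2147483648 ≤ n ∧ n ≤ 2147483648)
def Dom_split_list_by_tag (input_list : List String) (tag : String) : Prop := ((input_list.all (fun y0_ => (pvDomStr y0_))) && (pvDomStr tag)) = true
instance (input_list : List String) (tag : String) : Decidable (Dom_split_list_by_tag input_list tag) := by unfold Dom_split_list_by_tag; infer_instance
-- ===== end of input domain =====

-- B replaces A's flushed temp-list accumulator by tracking only the start index of the
-- current non-tag run and emitting slices (alternative decomposition, same cost).


-- ===== PORT A =====
-- the loop body of A: flush temp on a tag, otherwise append the item to temp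
def stepA (tag : String) (st : List (List String) × List String) (item : String) :
    List (List String) × List String :=
  if item = tag then
    (if st.2 ≠ [] then (st.1 ++ [st.2], ([] : List String)) else st)
  else (st.1, st.2 ++ [item])

def split_list_by_tag (input_list : List String) (tag : String) : List (List String) :=
  let st := input_list.foldl (stepA tag) (([] : List (List String)), ([] : List String))
  if st.2 ≠ [] then st.1 ++ [st.2] else st.1

-- ===== PORT B =====
-- the loop body of B: on a tag close the pending run (a slice of input_list), otherwise
-- open a run at the current index if none is pending
def stepB (input_list : List String) (tag : String)
    (st : List (List String) × Option Int) (p : Int × String) :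
    List (List String) × Option Int :=
  if p.2 = tag then
    match st.2 with
    | some s => (st.1 ++ [PySem.List.slice input_list (some s) (some p.1)], none)
    | none => st
  else
    match st.2 with
    | none => (st.1, some p.1)
    | some _ => st

def split_list_by_tag_alt (input_list : List String) (tag : String) : List (List String) :=
  let st := (PySem.List.enumerate input_list 0).foldl (stepB input_list tag)
    (([] : List (List String)), (none : Option Int))
  match st.2 with
  | some s => st.1 ++ [PySem.List.slice input_list (some s) none]
  | none => st.1

-- ===== PRECONDITION & SPEC =====
def Spec_split_list_by_tag (input_list : List String) (tag : String) (out : List (List String)) : Prop := out = split_list_by_tag_alt input_list tag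
instance (input_list : List String) (tag : String) (out : List (List String)) : Decidable (Spec_split_list_by_tag input_list tag out) := by unfold Spec_split_list_by_tag; infer_instance

-- ===== CLAIM (what is proved, stated in full; the proofs are below) =====
def Claim_equal_split_list_by_tag : Prop := ∀ (input_list : List String) (tag : String), Dom_split_list_by_tag input_list tag → Spec_split_list_by_tag input_list tag (split_list_by_tag input_list tag)

-- ===== LEMMAS AND PROOFS =====

-- simultaneous loop invariant: A's temp is exactly the slice of L from B's pending start
-- index up to the current position (and temp = [] iff no run is pending)
lemma loop_eq (tag : String) (L : List String) :
    ∀ (l : List String) (i : Nat) (out : List (List String)) (temp : List String)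
      (start : Option Int),
    L.drop i = l →
    (start = none → temp = []) →
    (∀ s : Int, start = some s →
      ∃ sN : Nat, s = (sN : Int) ∧ sN < i ∧ temp = (L.drop sN).take (i - sN) ∧ temp ≠ []) →
    (let stA := l.foldl (stepA tag) (out, temp)
     let stB := (PySem.List.enumerate l (i : Int)).foldl (stepB L tag) (out, start)
     (if stA.2 ≠ [] then stA.1 ++ [stA.2] else stA.1) =
     (match stB.2 with
      | some s => stB.1 ++ [PySem.List.slice L (some s) none]
      | none => stB.1)) := by
  intro l
  induction l with
  | nil =>
    intro i out temp start hdrop hnone hsome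
    simp only [List.foldl_nil, PySem.List.enumerate_nil]
    match start with
    | none =>
      simp [hnone rfl]
    | some s =>
      obtain ⟨sN, rfl, hlt, htemp, hne⟩ := hsome s rfl
      have hlen : L.length ≤ i := List.drop_eq_nil_iff.mp hdrop
      have : temp = L.drop sN := by
        rw [htemp, List.take_of_length_le]
        rw [List.length_drop]; omega
      have hlt2 : sN < L.length := by
        by_contra h
        rw [List.drop_eq_nil_of_le (by omega)] at this
        exact hne this
      simp [this, PySem.List.slice_from_natCast, hlt2]
  | cons x xs ih =>
    intro i out temp start hdrop hnone hsome
    have hdrop' : L.drop (i + 1) = xs := by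
      rw [← List.tail_drop, hdrop]
      rfl
    have hlenL : i < L.length := by
      by_contra h
      rw [List.drop_eq_nil_of_le (by omega)] at hdrop
      simp at hdrop
    have hgetx : L[i]'hlenL = x := by
      have h0 : (L.drop i)[0]'(by rw [hdrop]; simp) = x := by
        simp [hdrop]
      rw [List.getElem_drop] at h0
      simpa using h0
    simp only [List.foldl_cons, PySem.List.enumerate_cons]
    by_cases hx : x = tag
    · -- tag item: A flushes temp (if nonempty), B closes the pending run
      match start with
      | none =>
        have ht : temp = [] := hnone rfl
        simp only [stepA, stepB, hx, ht]
        simpa using ih (i + 1) out [] none hdrop' (fun _ => rfl) (by simp)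
      | some s =>
        obtain ⟨sN, rfl, hlt, htemp, hne⟩ := hsome _ rfl
        have hslice : PySem.List.slice L (some (sN : Int)) (some (i : Int)) = temp := by
          rw [PySem.List.slice_natCast, htemp]
        simp only [stepA, stepB, hx, if_pos hne, hslice]
        simpa using ih (i + 1) (out ++ [temp]) [] none hdrop' (fun _ => rfl) (by simp)
    · -- non-tag item: A appends to temp, B opens a run if none is pending
      match start with
      | none =>
        have ht : temp = [] := hnone rfl
        simp only [stepA, stepB, hx, ht, List.nil_append]
        have hinv : ∀ s : Int, some (i : Int) = some s →
            ∃ sN : Nat, s = (sN : Int) ∧ sN < i + 1 ∧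
              [x] = (L.drop sN).take (i + 1 - sN) ∧ ([x] : List String) ≠ [] := by
          intro s hs
          refine ⟨i, by simpa using hs.symm, by omega, ?_, by simp⟩
          rw [hdrop]; simp
        simpa using ih (i + 1) out [x] (some (i : Int)) hdrop' (by simp) hinv
      | some s =>
        obtain ⟨sN, rfl, hlt, htemp, hne⟩ := hsome _ rfl
        simp only [stepA, stepB, hx]
        have hinv : ∀ s : Int, some ((sN : Nat) : Int) = some s →
            ∃ sN' : Nat, s = (sN' : Int) ∧ sN' < i + 1 ∧
              temp ++ [x] = (L.drop sN').take (i + 1 - sN') ∧ temp ++ [x] ≠ [] := by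
          intro s hs
          refine ⟨sN, by simpa using hs.symm, by omega, ?_, by simp⟩
          have hlen2 : i - sN < (L.drop sN).length := by
            simp [List.length_drop]; omega
          have hget : (L.drop sN)[i - sN]'hlen2 = x := by
            rw [List.getElem_drop]
            have : sN + (i - sN) = i := by omega
            simp_rw [this]
            exact hgetx
          have hn : i + 1 - sN = (i - sN) + 1 := by omega
          have hopt : (L.drop sN)[i - sN]? = some x := by
            rw [List.getElem?_eq_getElem hlen2, hget]
          rw [hn, List.take_add_one, hopt, htemp]
          rfl
        simpa using ih (i + 1) out (temp ++ [x]) (some ((sN : Nat) : Int)) hdrop' (by simp) hinv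

-- ===== VERDICT (by name: the statement is the Claim_ definition above) =====
theorem split_list_by_tag_spec : Claim_equal_split_list_by_tag := by
  intro input_list tag _
  unfold Spec_split_list_by_tag split_list_by_tag split_list_by_tag_alt
  have h := loop_eq tag input_list input_list 0 [] [] none (by simp) (fun _ => rfl) (by simp)
  simpa using h
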